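-- pv_equiv track=rewrite | github.com/ClusterLabs/pcs | pcs_test/suite.py | tier1_fixtures_needed
-- ===== SOURCE A (Python) =====
-- def tier1_fixtures_needed(test_list: list[str]) -> set[str]:
--     fixture_modules = {
--         "pcs_test.tier1.legacy.test_constraints",
--         "pcs_test.tier1.legacy.test_resource",
--         "pcs_test.tier1.legacy.test_stonith",
--     }
--     fixtures_needed = set()
--     for test_name in test_list:
--         for module in fixture_modules:
--             if test_name.startswith(module):
--                 fixtures_needed.add(module)
--         if fixture_modules == fixtures_needed:
--             break
--     return fixtures_needed
-- ===== SOURCE B (Python) =====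
-- FIXTURE_MODULES = {
--     "pcs_test.tier1.legacy.test_constraints",
--     "pcs_test.tier1.legacy.test_resource",
--     "pcs_test.tier1.legacy.test_stonith",
-- }
--
--
-- def tier1_fixtures_needed(test_list):
--     # A test needs fixture module m exactly when its name clipped to len(m)
--     # equals m, so collect every clipped prefix once and intersect with the
--     # module set -- one hash-set intersection instead of per-test prefix scans.
--     lengths = {len(m) for m in FIXTURE_MODULES}
--     prefixes = {t[:n] for t in test_list for n in lengths}
--     return prefixes & FIXTURE_MODULES
-- ===== Notes on version B (the rewrite author's own statement) =====
-- stated objective: alternative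
-- what changed: Replaces A's per-test nested startswith scan with an accumulator set and a completeness break by a set-algebra computation: clip every test name to the fixture-module lengths into one prefix set and intersect it with the module set.
import Mathlib
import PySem

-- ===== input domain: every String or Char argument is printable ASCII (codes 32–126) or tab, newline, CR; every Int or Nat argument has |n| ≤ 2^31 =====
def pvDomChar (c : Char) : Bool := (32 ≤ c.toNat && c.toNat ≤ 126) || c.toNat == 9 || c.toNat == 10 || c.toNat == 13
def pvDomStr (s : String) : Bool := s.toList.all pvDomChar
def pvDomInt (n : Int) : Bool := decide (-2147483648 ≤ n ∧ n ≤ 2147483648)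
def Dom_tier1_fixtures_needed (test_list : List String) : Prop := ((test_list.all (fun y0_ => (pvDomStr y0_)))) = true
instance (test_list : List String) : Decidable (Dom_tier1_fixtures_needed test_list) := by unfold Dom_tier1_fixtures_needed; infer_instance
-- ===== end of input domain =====

-- B replaces A's nested startswith scan with accumulator and break by a set intersection:
-- it clips every test name to the fixture-module lengths once and intersects that prefix set
-- with the module set (objective: simpler/alternative; same return value, proved below).

def pvFixtureModules : List String :=
  ["pcs_test.tier1.legacy.test_constraints",
   "pcs_test.tier1.legacy.test_resource",
   "pcs_test.tier1.legacy.test_stonith"]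

-- ===== PORT A =====
-- the outer for-loop with its break, over the accumulator set fixtures_needed
def pvLoopA : List String → PySem.Set String → PySem.Set String
  | [], acc => acc
  | t :: ts, acc =>
      -- inner 'for module in fixture_modules: if test_name.startswith(module): add'
      let acc' := pvFixtureModules.foldl
        (fun a m => if PySem.Str.startswith t m then PySem.Set.add a m else a) acc
      if PySem.Set.equal (PySem.Set.ofList pvFixtureModules) acc' then acc' else pvLoopA ts acc'

def tier1_fixtures_needed (test_list : List String) : List String :=
  pvLoopA test_list PySem.Set.empty

-- ===== PORT B =====
-- lengths = {len(m) for m in FIXTURE_MODULES}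
def pvLengths : PySem.Set Int :=
  PySem.Set.ofList (pvFixtureModules.map PySem.Str.len)

-- prefixes = {t[:n] for t in test_list for n in lengths}; return prefixes & FIXTURE_MODULES
def tier1_fixtures_needed_alt (test_list : List String) : List String :=
  let prefixes : PySem.Set String :=
    PySem.Set.ofList
      (test_list.flatMap (fun t => pvLengths.map (fun n => PySem.Str.slice t none (some n))))
  PySem.Set.inter prefixes (PySem.Set.ofList pvFixtureModules)

-- ===== PRECONDITION & SPEC =====
def Spec_tier1_fixtures_needed (test_list : List String) (out : List String) : Prop := out = tier1_fixtures_needed_alt test_list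
instance (test_list : List String) (out : List String) : Decidable (Spec_tier1_fixtures_needed test_list out) := by unfold Spec_tier1_fixtures_needed; infer_instance

-- ===== CLAIM (what is proved, stated in full; the proofs are below) =====
def Claim_equal_tier1_fixtures_needed : Prop := ∀ (test_list : List String), Dom_tier1_fixtures_needed test_list → Spec_tier1_fixtures_needed test_list (tier1_fixtures_needed test_list)

-- ===== LEMMAS AND PROOFS =====

-- the (unique) fixture module a test name matches, if any
def pvModuleOf (test_name : String) : Option String :=
  pvFixtureModules.find? (fun m => PySem.Str.startswith test_name m)

-- at most one fixture module is a prefix of a given test name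
theorem pv_unique_match {t m1 m2 : String} (h1 : m1 ∈ pvFixtureModules)
    (h2 : m2 ∈ pvFixtureModules) (s1 : PySem.Str.startswith t m1 = true)
    (s2 : PySem.Str.startswith t m2 = true) : m1 = m2 := by
  simp only [PySem.Str.startswith, PySem.Chars.startswith, List.isPrefixOf_iff_prefix] at s1 s2
  have hor := List.prefix_or_prefix_of_prefix s1 s2
  simp only [pvFixtureModules, List.mem_cons, List.not_mem_nil, or_false] at h1 h2
  rcases h1 with h1 | h1 | h1 <;> rcases h2 with h2 | h2 | h2 <;> subst h1 <;> subst h2 <;>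
    first
      | rfl
      | (exfalso; revert hor; decide)

-- === A side: eliminating the break, A is the fold adding each test's unique match ===

-- the inner module loop adds exactly the (unique) module found by pvModuleOf
theorem pv_inner_eq (t : String) (a : PySem.Set String) :
    pvFixtureModules.foldl
      (fun a m => if PySem.Str.startswith t m then PySem.Set.add a m else a) a
      = match pvModuleOf t with
        | none => a
        | some m => PySem.Set.add a m := by
  have hu := @pv_unique_match t
  simp only [pvModuleOf, pvFixtureModules, List.foldl, List.find?] at hu ⊢
  cases hb1 : PySem.Str.startswith t "pcs_test.tier1.legacy.test_constraints" <;>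
  cases hb2 : PySem.Str.startswith t "pcs_test.tier1.legacy.test_resource" <;>
  cases hb3 : PySem.Str.startswith t "pcs_test.tier1.legacy.test_stonith" <;>
    simp only [if_true, if_false, Bool.false_eq_true] <;>
    first
      | rfl
      | exact absurd (hu (by simp) (by simp) hb1 hb2) (by decide)
      | exact absurd (hu (by simp) (by simp) hb1 hb3) (by decide)
      | exact absurd (hu (by simp) (by simp) hb2 hb3) (by decide)

-- once fixtures_needed equals fixture_modules, further iterations change nothing
theorem pv_step_stable (a : PySem.Set String)
    (h : PySem.Set.equal (PySem.Set.ofList pvFixtureModules) a = true) (t : String) :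
    (match pvModuleOf t with
      | none => a
      | some m => PySem.Set.add a m) = a := by
  cases hm : pvModuleOf t with
  | none => rfl
  | some m =>
      have hmem : m ∈ pvFixtureModules := List.mem_of_find?_eq_some hm
      have hsub : (PySem.Set.ofList pvFixtureModules).issubset a = true := by
        simp only [PySem.Set.equal, Bool.and_eq_true] at h; exact h.1
      have hin : a.contains m = true := by
        simp only [PySem.Set.issubset, List.all_eq_true] at hsub
        exact hsub m (by simpa [PySem.Set.mem_ofList] using hmem)
      simp only [PySem.Set.add, hin, if_true]

-- and so the remaining fold after the break leaves the set unchanged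
theorem pv_fold_stable (a : PySem.Set String)
    (h : PySem.Set.equal (PySem.Set.ofList pvFixtureModules) a = true) (ts : List String) :
    ts.foldl
      (fun a t => match pvModuleOf t with
        | none => a
        | some m => PySem.Set.add a m) a = a := by
  induction ts with
  | nil => rfl
  | cons t ts ih => rw [List.foldl_cons, pv_step_stable a h t]; exact ih

-- eliminating the break: pvLoopA is the plain fold of the per-test step
theorem pv_loopA_eq (ts : List String) (a : PySem.Set String) :
    pvLoopA ts a = ts.foldl
      (fun a t => match pvModuleOf t with
        | none => a
        | some m => PySem.Set.add a m) a := by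
  induction ts generalizing a with
  | nil => rfl
  | cons t ts ih =>
      simp only [pvLoopA]
      rw [pv_inner_eq]
      by_cases hb : PySem.Set.equal (PySem.Set.ofList pvFixtureModules)
          (match pvModuleOf t with | none => a | some m => PySem.Set.add a m) = true
      · rw [if_pos hb, List.foldl_cons, pv_fold_stable _ hb]
      · rw [if_neg hb, List.foldl_cons, ih]

-- the per-test fold is the Set.add fold over the mapped-and-filtered modules
theorem pv_fold_filterMap (ts : List String) (a : PySem.Set String) :
    ts.foldl
      (fun a t => match pvModuleOf t with
        | none => a
        | some m => PySem.Set.add a m) a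
      = (ts.filterMap pvModuleOf).foldl PySem.Set.add a := by
  induction ts generalizing a with
  | nil => rfl
  | cons t ts ih =>
      rw [List.foldl_cons, List.filterMap_cons]
      cases pvModuleOf t <;> simp [ih]

-- === B side: the intersection of the clipped-prefix set with the module set ===

-- discard of a non-member is the identity
theorem pv_discard_of_not_mem {s : PySem.Set String} {x : String} (h : x ∉ s) :
    PySem.Set.discard s x = s := by
  simp only [PySem.Set.discard]
  exact List.filter_eq_self.mpr (fun y hy => by
    simp only [Bool.not_eq_eq_eq_not, Bool.not_true, beq_eq_false_iff_ne]
    exact fun he => h (he ▸ hy))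

-- set(L) filtered is set(L filtered): filter commutes with first-occurrence dedup
theorem pv_filter_discard (p : String → Bool) (s : PySem.Set String) (x : String) :
    List.filter p (PySem.Set.discard s x) = PySem.Set.discard (List.filter p s) x := by
  simp [PySem.Set.discard, List.filter_filter]
  exact List.filter_congr (fun y _ => Bool.and_comm _ _)

-- set(L) filtered is set(L filtered): filter commutes with first-occurrence dedup
theorem pv_filter_ofList (p : String → Bool) (L : List String) :
    (PySem.Set.ofList L).filter p = PySem.Set.ofList (L.filter p) := by
  induction L with
  | nil => rfl
  | cons x xs ih =>
      rw [PySem.Set.ofList_cons, List.filter_cons, pv_filter_discard, ih]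
      by_cases hp : p x = true
      · rw [if_pos hp, List.filter_cons, if_pos hp, PySem.Set.ofList_cons]
      · rw [if_neg hp, List.filter_cons, if_neg hp]
        exact pv_discard_of_not_mem (by
          intro hx
          have := (PySem.Set.mem_ofList (xs.filter p) x).mp hx
          exact hp (List.of_mem_filter this))

-- every clipped prefix t[:n] (n from the module lengths) is a prefix of t
theorem pv_slice_prefix (t : String) (n : Int) (hn : 0 ≤ n) :
    (PySem.Str.slice t none (some n)).toList <+: t.toList := by
  rw [PySem.Str.toList_slice, PySem.Chars.slice_eq_listSlice,
    show PySem.List.slice t.toList none (some n) = t.toList.take n.toNat from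
      PySem.List.slice_to _ hn]
  exact List.take_prefix _ _

-- a clipped prefix that is a fixture module makes startswith true
theorem pv_chunk_startswith (t y : String) (n : Int) (hn : 0 ≤ n)
    (hy : y = PySem.Str.slice t none (some n)) : PySem.Str.startswith t y = true := by
  rw [PySem.Str.startswith_eq, PySem.Chars.startswith_iff, hy]
  exact pv_slice_prefix t n hn

-- the per-test chunk of B: clipped prefixes that are fixture modules
def pvChunkF (t : String) : List String :=
  (pvLengths.map (fun n => PySem.Str.slice t none (some n))).filter
    (fun y => (PySem.Set.ofList pvFixtureModules).contains y)

-- when no module matches t, no clipped prefix is a module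
theorem pv_chunkF_none (t : String) (h : pvModuleOf t = none) : pvChunkF t = [] := by
  apply List.filter_eq_nil_iff.mpr
  intro y hy hc
  have hmem : y ∈ pvFixtureModules := by
    have := (PySem.Set.contains_iff (PySem.Set.ofList pvFixtureModules) y).mp hc
    exact (PySem.Set.mem_ofList pvFixtureModules y).mp this
  obtain ⟨n, hn, hyn⟩ := List.mem_map.mp hy
  have hn0 : 0 ≤ n := by
    have he : pvLengths = [(38 : Int), 35, 34] := by decide
    rw [he] at hn
    simp only [List.mem_cons, List.not_mem_nil, or_false] at hn
    rcases hn with rfl | rfl | rfl <;> norm_num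
  have hsw := pv_chunk_startswith t y n hn0 hyn.symm
  have := List.find?_eq_none.mp h y hmem
  exact this hsw

-- when m matches t, every surviving clipped prefix equals m
theorem pv_chunkF_all (t m : String) (h : pvModuleOf t = some m) :
    ∀ y ∈ pvChunkF t, y = m := by
  intro y hy
  have hyc := List.mem_filter.mp hy
  have hmem : y ∈ pvFixtureModules := by
    have := (PySem.Set.contains_iff (PySem.Set.ofList pvFixtureModules) y).mp hyc.2
    exact (PySem.Set.mem_ofList pvFixtureModules y).mp this
  obtain ⟨n, hn, hyn⟩ := List.mem_map.mp hyc.1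
  have hn0 : 0 ≤ n := by
    have he : pvLengths = [(38 : Int), 35, 34] := by decide
    rw [he] at hn
    simp only [List.mem_cons, List.not_mem_nil, or_false] at hn
    rcases hn with rfl | rfl | rfl <;> norm_num
  have hsw := pv_chunk_startswith t y n hn0 hyn.symm
  exact pv_unique_match hmem (List.mem_of_find?_eq_some h) hsw
    (List.find?_some h)

-- and m itself survives: t clipped to len(m) is m
theorem pv_chunkF_mem (t m : String) (h : pvModuleOf t = some m) : m ∈ pvChunkF t := by
  have hmem : m ∈ pvFixtureModules := List.mem_of_find?_eq_some h
  have hsw : PySem.Str.startswith t m = true := List.find?_some h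
  have hpre : m.toList <+: t.toList := by
    rwa [PySem.Str.startswith_eq, PySem.Chars.startswith_iff] at hsw
  have htake : m.toList = t.toList.take m.toList.length := List.prefix_iff_eq_take.mp hpre
  have hslice : PySem.Str.slice t none (some (PySem.Str.len m)) = m := by
    apply String.ext
    rw [PySem.Str.toList_slice, PySem.Chars.slice_eq_listSlice,
      show PySem.List.slice t.toList none (some (PySem.Str.len m))
          = t.toList.take (PySem.Str.len m).toNat from
        PySem.List.slice_to _ (by simp [PySem.Str.len]),
      show (PySem.Str.len m).toNat = m.toList.length from by simp [PySem.Str.len]]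
    exact htake.symm
  apply List.mem_filter.mpr
  refine ⟨List.mem_map.mpr ⟨PySem.Str.len m, ?_, hslice⟩, ?_⟩
  · revert hmem
    simp only [pvFixtureModules, pvLengths, List.mem_cons, List.not_mem_nil, or_false]
    rintro (rfl | rfl | rfl) <;> decide
  · simp only [PySem.Set.contains_eq_listContains]
    exact List.elem_eq_true_of_mem ((PySem.Set.mem_ofList pvFixtureModules m).mpr hmem)

-- updating with a nonempty list of copies of m is one add
theorem pv_update_const (s : PySem.Set String) (m : String) :
    ∀ xs : List String, (∀ y ∈ xs, y = m) → xs ≠ [] →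
      PySem.Set.update s xs = PySem.Set.add s m := by
  intro xs
  induction xs generalizing s with
  | nil => intro _ h; exact absurd rfl h
  | cons y ys ih =>
      intro hall _
      have hy : y = m := hall y List.mem_cons_self
      subst hy
      rw [PySem.Set.update_cons]
      by_cases hys : ys = []
      · subst hys; rfl
      · rw [ih (PySem.Set.add s y) (fun z hz => hall z (List.mem_cons_of_mem y hz)) hys]
        exact PySem.Set.add_of_mem ((PySem.Set.mem_add s y y).mpr (Or.inr rfl))

-- each chunk updates the accumulator exactly as adding the unique match does
theorem pv_update_chunk (s : PySem.Set String) (t : String) :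
    PySem.Set.update s (pvChunkF t) = PySem.Set.update s ((pvModuleOf t).toList) := by
  cases h : pvModuleOf t with
  | none => rw [pv_chunkF_none t h]; rfl
  | some m =>
      rw [pv_update_const s m (pvChunkF t) (pv_chunkF_all t m h)
        (List.ne_nil_of_mem (pv_chunkF_mem t m h))]
      rfl

-- hence the whole filtered prefix list builds the same set as the match list
theorem pv_update_flatMap (ts : List String) (s : PySem.Set String) :
    PySem.Set.update s (ts.flatMap pvChunkF)
      = PySem.Set.update s (ts.flatMap (fun t => (pvModuleOf t).toList)) := by
  induction ts generalizing s with
  | nil => rfl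
  | cons t ts ih =>
      rw [List.flatMap_cons, List.flatMap_cons, PySem.Set.update_append,
        PySem.Set.update_append, pv_update_chunk, ih]

-- flatMap over Option.toList is filterMap
theorem pv_flatMap_toList (ts : List String) :
    ts.flatMap (fun t => (pvModuleOf t).toList) = ts.filterMap pvModuleOf := by
  induction ts with
  | nil => rfl
  | cons t ts ih => rw [List.flatMap_cons, List.filterMap_cons]; cases pvModuleOf t <;> simp [ih]

-- ===== VERDICT (by name: the statement is the Claim_ definition above) =====
theorem tier1_fixtures_needed_spec : Claim_equal_tier1_fixtures_needed := by
  intro tl _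
  unfold Spec_tier1_fixtures_needed tier1_fixtures_needed tier1_fixtures_needed_alt
  rw [pv_loopA_eq, pv_fold_filterMap]
  show List.foldl PySem.Set.add [] (tl.filterMap pvModuleOf)
      = PySem.Set.inter (PySem.Set.ofList (tl.flatMap _)) (PySem.Set.ofList pvFixtureModules)
  rw [PySem.Set.inter, pv_filter_ofList, List.filter_flatMap]
  show _ = PySem.Set.ofList (tl.flatMap pvChunkF)
  rw [← PySem.Set.update_nil_left, pv_update_flatMap, PySem.Set.update_nil_left,
    pv_flatMap_toList, PySem.Set.ofList_eq_foldl]
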